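-- pv_equiv track=rewrite | github.com/HyunSung-Na/TIL-algorism | 알고리즘/마이다스아이티_1.py | solution
-- ===== SOURCE A (Python) =====
-- def solution(openA, closeB):
--     answer = 0
--     last_time = closeB[-1]
--     flag = False
--     openA.sort(reverse=True)
--     closeB.sort(reverse=True)
--     next_open = openA.pop()
--     next_close = closeB.pop()
--     for i in range(1, last_time + 1):
--
--         if flag:
--             answer += 1
--
--         if i == next_open:
--             flag = True
--             if openA:
--                 next_open = openA.pop()
--             else:
--                 next_open = -1
--         elif i == next_close:
--             flag = False
--             if closeB:
--                 next_close = closeB.pop()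
--     return answer
-- ===== SOURCE B (Python) =====
-- def solution(openA, closeB):
--     # Event-jump re-implementation: instead of stepping through every time unit,
--     # jump between the next relevant event times and add interval lengths.
--     # (A mutates its arguments in place; B does not — return value only.)
--     last_time = closeB[-1]
--     opens = sorted(openA)
--     closes = sorted(closeB)
--     next_open = opens[0]
--     next_close = closes[0]
--     oi = 1
--     ci = 1
--     answer = 0
--     flag = False
--     cur = 1
--     while cur <= last_time:
--         cands = []
--         if cur <= next_open <= last_time:
--             cands.append(next_open)
--         if cur <= next_close <= last_time:
--             cands.append(next_close)
--         if not cands: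
--             if flag:
--                 answer += last_time - cur + 1
--             break
--         t = min(cands)
--         if flag:
--             answer += t - cur + 1
--         if t == next_open:
--             flag = True
--             next_open = opens[oi] if oi < len(opens) else -1
--             oi += 1
--         else:
--             flag = False
--             if ci < len(closes):
--                 next_close = closes[ci]
--                 ci += 1
--         cur = t + 1
--     return answer
-- ===== Notes on version B (the rewrite author's own statement) =====
-- stated objective: alternative
-- what changed: A steps through every time unit from 1 to last_time flipping a flag; B sorts copies of the lists once and jumps directly between successive matching event times, adding whole interval lengths to the answer.
import Mathlib
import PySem

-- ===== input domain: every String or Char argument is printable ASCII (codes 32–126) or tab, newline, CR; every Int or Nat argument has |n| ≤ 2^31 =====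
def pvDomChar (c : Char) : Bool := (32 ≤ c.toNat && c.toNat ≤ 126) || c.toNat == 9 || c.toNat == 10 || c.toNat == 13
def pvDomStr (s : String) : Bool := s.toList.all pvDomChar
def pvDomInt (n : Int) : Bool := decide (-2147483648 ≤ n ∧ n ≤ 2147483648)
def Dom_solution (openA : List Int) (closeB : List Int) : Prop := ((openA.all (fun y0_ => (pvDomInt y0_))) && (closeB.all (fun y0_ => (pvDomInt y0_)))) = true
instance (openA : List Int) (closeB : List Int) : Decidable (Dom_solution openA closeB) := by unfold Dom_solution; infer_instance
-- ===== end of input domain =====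

-- B replaces A's per-time-unit scan by a jump between event times, adding interval
-- lengths.  A sorts and pops its argument lists in place; B does not mutate them —
-- the equivalence proved here is about the return value only.

-- ===== PORT A =====
-- loop state: (answer, flag, next_open, openA-stack, next_close, closeB-stack)
def aStep (st : Int × Bool × Int × List Int × Int × List Int) (i : Int) :
    Int × Bool × Int × List Int × Int × List Int :=
  match st with
  | (answer, flag, nextOpen, oa, nextClose, cb) =>
    let answer := if flag then answer + 1 else answer
    if i = nextOpen then
      match PySem.List.pop? oa (-1) with
      | some (v, oa') => (answer, true, v, oa', nextClose, cb)
      | none => (answer, true, -1, oa, nextClose, cb)       -- openA empty: next_open = -1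
    else if i = nextClose then
      match PySem.List.pop? cb (-1) with
      | some (v, cb') => (answer, false, nextOpen, oa, v, cb')
      | none => (answer, false, nextOpen, oa, nextClose, cb) -- closeB empty: keep next_close
    else (answer, flag, nextOpen, oa, nextClose, cb)

def solution (openA : List Int) (closeB : List Int) : Int :=
  let answer : Int := 0
  let last_time := PySem.List.pyGetD closeB (-1) 0
  let flag := false
  let oa := PySem.List.sorted openA (fun x => x) true
  let cb := PySem.List.sorted closeB (fun x => x) true
  match PySem.List.pop? oa (-1), PySem.List.pop? cb (-1) with
  | some (next_open, oa'), some (next_close, cb') =>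
    ((PySem.List.pyRange 1 (last_time + 1) 1).foldl aStep
      (answer, flag, next_open, oa', next_close, cb')).1
  | _, _ => 0  -- pop()/closeB[-1] raise IndexError on empty input; excluded by Pre_solution

-- ===== PORT B =====
def bLoop (opens closes : List Int) (last_time : Int) :
    Nat → Int → Bool → Int → Int → Nat → Nat → Int → Int
  | 0, answer, _, _, _, _, _, _ => answer   -- fuel exhausted (never reached with enough fuel)
  | fuel + 1, answer, flag, next_open, next_close, oi, ci, cur =>
    if cur ≤ last_time then
      let cands := (if cur ≤ next_open ∧ next_open ≤ last_time then [next_open] else [])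
                 ++ (if cur ≤ next_close ∧ next_close ≤ last_time then [next_close] else [])
      if hne : cands = [] then
        if flag then answer + (last_time - cur + 1) else answer
      else
        let t := cands.tail.foldl min (cands.head hne)   -- min(cands)
        let answer := if flag then answer + (t - cur + 1) else answer
        if t = next_open then
          bLoop opens closes last_time fuel answer true
            (if _ : oi < opens.length then opens[oi] else -1) next_close (oi + 1) ci (t + 1)
        else
          if _ : ci < closes.length then
            bLoop opens closes last_time fuel answer false next_open closes[ci] oi (ci + 1) (t + 1)
          else
            bLoop opens closes last_time fuel answer false next_open next_close oi ci (t + 1)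
    else answer

def solution_alt (openA : List Int) (closeB : List Int) : Int :=
  let last_time := PySem.List.pyGetD closeB (-1) 0
  let opens := PySem.List.sorted openA (fun x => x) false
  let closes := PySem.List.sorted closeB (fun x => x) false
  match opens, closes with
  | o0 :: _, c0 :: _ => bLoop opens closes last_time (last_time.toNat + 1) 0 false o0 c0 1 1 1
  | _, _ => 0  -- opens[0]/closeB[-1] raise IndexError on empty input; excluded by Pre_solution

-- ===== PRECONDITION & SPEC =====
-- Pre_ excludes exactly the inputs on which A raises IndexError (empty openA or empty closeB).
def Pre_solution (openA : List Int) (closeB : List Int) : Prop := openA ≠ [] ∧ closeB ≠ []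
instance (openA : List Int) (closeB : List Int) : Decidable (Pre_solution openA closeB) := by unfold Pre_solution; infer_instance
def pvWitness_solution : List Int × List Int := ([1, 4], [3, 6])

def Spec_solution (openA : List Int) (closeB : List Int) (out : Int) : Prop := out = solution_alt openA closeB
instance (openA : List Int) (closeB : List Int) (out : Int) : Decidable (Spec_solution openA closeB out) := by unfold Spec_solution; infer_instance

-- ===== CLAIM (what is proved, stated in full; the proofs are below) =====
def Claim_equal_solution : Prop := ∀ (openA : List Int) (closeB : List Int), Dom_solution openA closeB → Pre_solution openA closeB → Spec_solution openA closeB (solution openA closeB)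

-- ===== LEMMAS AND PROOFS =====

-- sorted(xs, reverse=True) on integers is the reverse of sorted(xs)
theorem sorted_rev_eq_reverse (xs : List Int) :
    PySem.List.sorted xs (fun x => x) true = (PySem.List.sorted xs (fun x => x) false).reverse := by
  apply List.eq_of_perm_of_sorted (le := fun a b : Int => b ≤ a)
  · intro a b _ _ h1 h2; omega
  · exact PySem.List.sorted_pairwise_rev xs (fun x => x)
  · exact List.pairwise_reverse.mpr (PySem.List.sorted_pairwise xs (fun x => x))
  · exact (PySem.List.sorted_perm xs (fun x => x) true).trans
      (((List.reverse_perm _).trans (PySem.List.sorted_perm xs (fun x => x) false)).symm)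

-- popping the last element of (drop oi opens).reverse
theorem pop_drop_reverse (opens : List Int) (oi : Nat) (h : oi < opens.length) :
    PySem.List.pop? ((opens.drop oi).reverse) (-1)
      = some (opens[oi], (opens.drop (oi + 1)).reverse) := by
  have hd : opens.drop oi = opens[oi] :: opens.drop (oi + 1) := List.drop_eq_getElem_cons h
  rw [hd, List.reverse_cons, PySem.List.pop?_last]

-- A's loop over a stretch of times hitting no event only adds the flag
theorem aRun_skip (n : Nat) : ∀ (a b : Int), b - a = (n : Int) →
    ∀ (ans : Int) (flag : Bool) (no nc : Int) (oa cb : List Int),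
    (∀ i : Int, a ≤ i → i < b → i ≠ no ∧ i ≠ nc) →
    (PySem.List.pyRange a b 1).foldl aStep (ans, flag, no, oa, nc, cb)
      = ((if flag then ans + (b - a) else ans), flag, no, oa, nc, cb) := by
  induction n with
  | zero =>
    intro a b hab ans flag no nc oa cb _
    rw [PySem.List.pyRange_one_eq_nil (by omega)]
    simp; omega
  | succ m ih =>
    intro a b hab ans flag no nc oa cb hno
    rw [PySem.List.pyRange_one_cons (by omega), List.foldl_cons]
    have ha := hno a (le_refl a) (by omega)
    have hstep : aStep (ans, flag, no, oa, nc, cb) a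
        = ((if flag then ans + 1 else ans), flag, no, oa, nc, cb) := by
      simp [aStep, ha.1, ha.2]
    rw [hstep, ih (a + 1) b (by omega) _ flag no nc oa cb
      (fun i h1 h2 => hno i (by omega) h2)]
    cases flag <;> simp <;> omega

-- processing one event of B corresponds to a skip stretch plus one step of A
theorem event_step (opens closes : List Int) (L : Int) (m : Nat)
    (ih : ∀ cur : Int, (L + 1 - cur).toNat ≤ m → ∀ (ans : Int) (flag : Bool) (no nc : Int) (oi ci : Nat),
      ((PySem.List.pyRange cur (L + 1) 1).foldl aStep
        (ans, flag, no, (opens.drop oi).reverse, nc, (closes.drop ci).reverse)).1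
        = bLoop opens closes L m ans flag no nc oi ci cur)
    (cur : Int) (hc : (L + 1 - cur).toNat ≤ m + 1)
    (ans : Int) (flag : Bool) (no nc : Int) (oi ci : Nat) (t : Int)
    (ht1 : cur ≤ t) (ht2 : t ≤ L) (hor : t = no ∨ t = nc)
    (hskip : ∀ i : Int, cur ≤ i → i < t → i ≠ no ∧ i ≠ nc) :
    ((PySem.List.pyRange cur (L + 1) 1).foldl aStep
        (ans, flag, no, (opens.drop oi).reverse, nc, (closes.drop ci).reverse)).1
      = if t = no then
          bLoop opens closes L m (if flag then ans + (t - cur + 1) else ans) true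
            (if _ : oi < opens.length then opens[oi] else -1) nc (oi + 1) ci (t + 1)
        else if _ : ci < closes.length then
          bLoop opens closes L m (if flag then ans + (t - cur + 1) else ans) false no
            closes[ci] oi (ci + 1) (t + 1)
        else
          bLoop opens closes L m (if flag then ans + (t - cur + 1) else ans) false no nc
            oi ci (t + 1) := by
  rw [PySem.List.pyRange_one_append cur t (L + 1) (by omega) (by omega),
    List.foldl_append,
    aRun_skip (t - cur).toNat cur t (by omega) ans flag no nc _ _
      (fun i h1 h2 => hskip i h1 h2),
    PySem.List.pyRange_one_cons (show t < L + 1 by omega), List.foldl_cons]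
  by_cases hno : t = no
  · -- open event at time t
    rw [if_pos hno]
    subst hno
    by_cases hoi : oi < opens.length
    · rw [dif_pos hoi]
      have hstep : aStep ((if flag then ans + (t - cur) else ans), flag, t,
          (opens.drop oi).reverse, nc, (closes.drop ci).reverse) t
        = ((if flag then ans + (t - cur + 1) else ans), true, opens[oi],
          (opens.drop (oi + 1)).reverse, nc, (closes.drop ci).reverse) := by
        simp only [aStep, if_pos rfl, pop_drop_reverse opens oi hoi]
        cases flag <;> simp <;> ring_nf
      rw [hstep, ih (t + 1) (by omega)]
    · rw [dif_neg hoi]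
      have hdrop : opens.drop oi = ([] : List Int) := List.drop_eq_nil_of_le (by omega)
      have hdrop' : opens.drop (oi + 1) = ([] : List Int) := List.drop_eq_nil_of_le (by omega)
      have hstep : aStep ((if flag then ans + (t - cur) else ans), flag, t,
          (opens.drop oi).reverse, nc, (closes.drop ci).reverse) t
        = ((if flag then ans + (t - cur + 1) else ans), true, -1,
          (opens.drop (oi + 1)).reverse, nc, (closes.drop ci).reverse) := by
        rw [hdrop, hdrop']
        simp only [aStep, if_pos rfl, List.reverse_nil]
        have hpe : PySem.List.pop? ([] : List Int) (-1) = none := rfl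
        rw [hpe]
        cases flag <;> simp <;> ring_nf
      rw [hstep, ih (t + 1) (by omega)]
  · -- close event at time t (t = nc, and nc ≠ no)
    rw [if_neg hno]
    have hnc : t = nc := hor.resolve_left hno
    subst hnc
    by_cases hci : ci < closes.length
    · rw [dif_pos hci]
      have hstep : aStep ((if flag then ans + (t - cur) else ans), flag, no,
          (opens.drop oi).reverse, t, (closes.drop ci).reverse) t
        = ((if flag then ans + (t - cur + 1) else ans), false, no,
          (opens.drop oi).reverse, closes[ci], (closes.drop (ci + 1)).reverse) := by
        simp only [aStep, if_neg hno, if_pos rfl, pop_drop_reverse closes ci hci]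
        cases flag <;> simp <;> ring_nf
      rw [hstep, ih (t + 1) (by omega)]
    · rw [dif_neg hci]
      have hdrop : closes.drop ci = ([] : List Int) := List.drop_eq_nil_of_le (by omega)
      have hstep : aStep ((if flag then ans + (t - cur) else ans), flag, no,
          (opens.drop oi).reverse, t, (closes.drop ci).reverse) t
        = ((if flag then ans + (t - cur + 1) else ans), false, no,
          (opens.drop oi).reverse, t, (closes.drop ci).reverse) := by
        rw [hdrop]
        simp only [aStep, if_neg hno, if_pos rfl, List.reverse_nil]
        have hpe : PySem.List.pop? ([] : List Int) (-1) = none := rfl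
        rw [hpe]
        cases flag <;> simp <;> ring_nf
      rw [hstep, ih (t + 1) (by omega)]

-- main invariant: A's per-time fold equals B's event-jump loop
theorem main_lemma (opens closes : List Int) (L : Int) (n : Nat) :
    ∀ (cur : Int), (L + 1 - cur).toNat ≤ n →
    ∀ (ans : Int) (flag : Bool) (no nc : Int) (oi ci : Nat),
    ((PySem.List.pyRange cur (L + 1) 1).foldl aStep
        (ans, flag, no, (opens.drop oi).reverse, nc, (closes.drop ci).reverse)).1
      = bLoop opens closes L n ans flag no nc oi ci cur := by
  induction n with
  | zero =>
    intro cur hc ans flag no nc oi ci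
    rw [PySem.List.pyRange_one_eq_nil (by omega), List.foldl_nil, bLoop]
  | succ m ih =>
    intro cur hc ans flag no nc oi ci
    by_cases hcur : cur ≤ L
    · rw [bLoop, if_pos hcur]
      dsimp only
      split
      · rename_i hO
        split
        · rename_i hC
          -- cands = [no, nc]
          rw [dif_neg (by simp : ¬ ([no] ++ [nc] : List Int) = [])]
          simp only [List.cons_append, List.nil_append, List.head_cons, List.tail_cons,
            List.foldl_cons, List.foldl_nil]
          rcases le_total no nc with h | h
          · rw [min_eq_left h]
            simpa using event_step opens closes L m ih cur hc ans flag no nc oi ci no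
              (by omega) (by omega) (Or.inl rfl)
              (by intro i h1 h2; constructor <;> omega)
          · rw [min_eq_right h]
            simpa using event_step opens closes L m ih cur hc ans flag no nc oi ci nc
              (by omega) (by omega) (Or.inr rfl)
              (by intro i h1 h2; constructor <;> omega)
        · rename_i hC
          -- cands = [no]
          rw [dif_neg (by simp : ¬ ([no] ++ [] : List Int) = [])]
          simp only [List.append_nil, List.head_cons, List.tail_cons, List.foldl_nil]
          simpa using event_step opens closes L m ih cur hc ans flag no nc oi ci no
            (by omega) (by omega) (Or.inl rfl)
            (by intro i h1 h2; constructor <;> omega)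
      · rename_i hO
        split
        · rename_i hC
          -- cands = [nc]
          rw [dif_neg (by simp : ¬ (([] : List Int) ++ [nc]) = [])]
          simp only [List.nil_append, List.head_cons, List.tail_cons, List.foldl_nil]
          simpa using event_step opens closes L m ih cur hc ans flag no nc oi ci nc
            (by omega) (by omega) (Or.inr rfl)
            (by intro i h1 h2; constructor <;> omega)
        · rename_i hC
          -- cands = []: no event up to last_time, A only accumulates the flag
          rw [dif_pos (by simp : (([] : List Int) ++ []) = [])]
          rw [aRun_skip (L + 1 - cur).toNat cur (L + 1) (by omega) ans flag no nc _ _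
            (by intro i h1 h2; constructor <;> omega)]
          have harith : L + 1 - cur = L - cur + 1 := by ring
          rw [harith]
    · rw [PySem.List.pyRange_one_eq_nil (by omega), List.foldl_nil, bLoop, if_neg hcur]

-- ===== VERDICT (by name: the statement is the Claim_ definition above) =====
theorem solution_spec : Claim_equal_solution := by
  unfold Claim_equal_solution
  intro openA closeB _ hpre
  obtain ⟨hoA, hcB⟩ := hpre
  obtain ⟨o0, orest, hoe⟩ := List.exists_cons_of_ne_nil
    (show PySem.List.sorted openA (fun x => x) false ≠ [] by
      rw [Ne, PySem.List.sorted_eq_nil_iff]; exact hoA)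
  obtain ⟨c0, crest, hce⟩ := List.exists_cons_of_ne_nil
    (show PySem.List.sorted closeB (fun x => x) false ≠ [] by
      rw [Ne, PySem.List.sorted_eq_nil_iff]; exact hcB)
  unfold Spec_solution solution solution_alt
  simp only [sorted_rev_eq_reverse, hoe, hce, List.reverse_cons, PySem.List.pop?_last]
  have hmain := main_lemma (o0 :: orest) (c0 :: crest) (PySem.List.pyGetD closeB (-1) 0)
    ((PySem.List.pyGetD closeB (-1) 0).toNat + 1) 1 (by omega) 0 false o0 c0 1 1
  simp only [List.drop_one, List.tail_cons] at hmain
  exact hmain
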